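-- pv_equiv track=rewrite | github.com/arpanchal/BCT_Suburban_Optg | _path_finder.py | check_departure
-- ===== SOURCE A (Python) =====
-- from bisect import bisect_left
--
-- def check_departure(dep_min: int, route: list, offsets: dict,
--                     occupancy: dict, min_headway: int) -> tuple:
--     """
--     Check if departure at dep_min (from route[0]) is feasible.
--     Returns (min_gap_found, bottleneck_station) or (None, blocking_station).
--     """
--     worst_gap = 9999
--     bottleneck = route[0]
--     for stn in route:
--         off = offsets.get(stn)
--         if off is None: continue
--         occ = occupancy.get(stn, [])
--         if not occ: continue
--         arr = (dep_min + off) % 1440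
--         pos = bisect_left(occ, arr)
--         # Previous train time (wrapping midnight)
--         prev_t = occ[pos - 1] if pos > 0 else occ[-1] - 1440
--         # Next train time (wrapping midnight)
--         next_t = occ[pos] if pos < len(occ) else occ[0] + 1440
--         gap_before = arr - prev_t
--         gap_after  = next_t - arr
--         if gap_before < min_headway or gap_after < min_headway:
--             return None, stn
--         g = min(gap_before, gap_after)
--         if g < worst_gap:
--             worst_gap = g
--             bottleneck = stn
--     return worst_gap, bottleneck
-- ===== SOURCE B (Python) =====
-- def _ins_point(occ, x, lo, hi):
--     """Recursive insertion point: first index in [lo, hi) where x could be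
--     inserted keeping occ[lo:hi] ordered (same probe sequence as bisect_left)."""
--     if lo >= hi:
--         return lo
--     mid = (lo + hi) // 2
--     if occ[mid] < x:
--         return _ins_point(occ, x, mid + 1, hi)
--     return _ins_point(occ, x, lo, mid)
--
-- def _slot(occ, i):
--     """i-th entry of the 1440-minute periodic extension of the timetable occ:
--     valid for any index, no wrap conditionals needed."""
--     return occ[i % len(occ)] + 1440 * (i // len(occ))
--
-- def check_departure(dep_min: int, route: list, offsets: dict,
--                     occupancy: dict, min_headway: int) -> tuple:
--     gaps = []
--     for stn in route:
--         off = offsets.get(stn)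
--         if off is None:
--             continue
--         occ = occupancy.get(stn, [])
--         if not occ:
--             continue
--         arr = (dep_min + off) % 1440
--         pos = _ins_point(occ, arr, 0, len(occ))
--         g = min(arr - _slot(occ, pos - 1), _slot(occ, pos) - arr)
--         if g < min_headway:
--             return None, stn
--         gaps.append((g, stn))
--     return min([(9999, route[0])] + gaps, key=lambda p: p[0])
-- ===== Notes on version B (the rewrite author's own statement) =====
-- stated objective: alternative
-- what changed: Replaces the library bisect_left call by a recursive insertion-point search, the four explicit midnight-wrap conditionals (occ[pos-1] vs occ[-1]-1440, occ[pos] vs occ[0]+1440) by one closed-form 1440-periodic extension of the timetable slot(i) = occ[i % n] + 1440*(i // n) evaluated at pos-1 and pos, the two-sided OR failure test by a single comparison of the nearest-neighbour gap against the headway, and the running worst-gap/bottleneck accumulator with in-loop updates by collecting (gap, station) pairs and taking min with a key seeded with (9999, route[0]); …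
import Mathlib
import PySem

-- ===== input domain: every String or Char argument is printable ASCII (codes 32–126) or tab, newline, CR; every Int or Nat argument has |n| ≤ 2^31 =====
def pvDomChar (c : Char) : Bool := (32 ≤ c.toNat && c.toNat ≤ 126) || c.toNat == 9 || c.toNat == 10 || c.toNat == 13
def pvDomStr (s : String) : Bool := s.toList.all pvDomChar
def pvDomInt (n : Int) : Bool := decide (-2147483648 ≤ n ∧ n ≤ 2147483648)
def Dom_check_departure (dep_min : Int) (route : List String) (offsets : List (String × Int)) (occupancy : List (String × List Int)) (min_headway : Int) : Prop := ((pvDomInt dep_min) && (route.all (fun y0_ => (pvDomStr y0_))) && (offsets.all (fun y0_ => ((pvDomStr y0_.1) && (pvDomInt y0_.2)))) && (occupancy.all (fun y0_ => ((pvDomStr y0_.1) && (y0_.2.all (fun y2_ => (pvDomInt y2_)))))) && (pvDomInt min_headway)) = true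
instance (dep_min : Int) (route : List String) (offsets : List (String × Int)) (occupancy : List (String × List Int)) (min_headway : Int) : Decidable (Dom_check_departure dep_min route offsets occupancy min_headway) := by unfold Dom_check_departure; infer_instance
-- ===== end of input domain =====

-- B replaces the library bisect call by its own recursive insertion-point search, the four
-- midnight-wrap conditionals by one closed-form 1440-periodic extension of the timetable
-- (slot i = occ[i mod n] + 1440*(i div n)), the two-sided failure test by one nearest-gap
-- comparison, and the running worst-gap accumulator by collect-then-min(key).

-- ===== PORT A =====
-- the per-station loop of A; early 'return None, stn' ends the recursion
def pvALoop (dep_min : Int) (offsets : List (String × Int)) (occupancy : List (String × List Int)) (min_headway : Int) : List String → Int → String → Option Int × String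
  | [], worst_gap, bottleneck => (some worst_gap, bottleneck)
  | stn :: rest, worst_gap, bottleneck =>
    match PySem.Dict.get? (PySem.Dict.mk offsets) stn with
    | none => pvALoop dep_min offsets occupancy min_headway rest worst_gap bottleneck
    | some off =>
      let occ := PySem.Dict.getD (PySem.Dict.mk occupancy) stn []
      if occ = [] then pvALoop dep_min offsets occupancy min_headway rest worst_gap bottleneck
      else
        let arr := PySem.Int.mod (dep_min + off) 1440
        let pos := PySem.List.bisectLeft occ arr
        let prev_t := if 0 < pos then occ.getD (pos - 1) 0 else PySem.List.pyGetD occ (-1) 0 - 1440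
        let next_t := if pos < occ.length then occ.getD pos 0 else occ.getD 0 0 + 1440
        let gap_before := arr - prev_t
        let gap_after := next_t - arr
        if gap_before < min_headway ∨ gap_after < min_headway then (none, stn)
        else
          let g := min gap_before gap_after
          if g < worst_gap then pvALoop dep_min offsets occupancy min_headway rest g stn
          else pvALoop dep_min offsets occupancy min_headway rest worst_gap bottleneck

-- route[0] raises IndexError on an empty route; Pre_ excludes it, headD is never the default there
def check_departure (dep_min : Int) (route : List String) (offsets : List (String × Int)) (occupancy : List (String × List Int)) (min_headway : Int) : Option Int × String :=
  pvALoop dep_min offsets occupancy min_headway route 9999 (route.headD "")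

-- ===== PORT B =====
-- _ins_point of Source B: recursive insertion-point search over [lo, hi); callers keep
-- hi <= occ.length, so the probe index (lo+hi)/2 < hi is in range and getD is exact
def pvInsPoint (occ : List Int) (x : Int) (lo hi : Nat) : Nat :=
  if lo < hi then
    if occ.getD ((lo + hi) / 2) 0 < x then pvInsPoint occ x ((lo + hi) / 2 + 1) hi
    else pvInsPoint occ x lo ((lo + hi) / 2)
  else lo
termination_by hi - lo
decreasing_by all_goals omega

-- _slot of Source B: the i-th entry of the 1440-periodic extension of occ; only called with
-- occ nonempty (Python would raise ZeroDivisionError on []), where i mod n is in range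
def pvSlot (occ : List Int) (i : Int) : Int :=
  occ.getD (PySem.Int.mod i occ.length).toNat 0 + 1440 * PySem.Int.floordiv i occ.length

-- per-station step of Source B: nearest gap to the two periodic neighbours of the arrival
def pvStationGap (stn : String) (dep_min : Int) (offsets : List (String × Int)) (occupancy : List (String × List Int)) : Option Int :=
  match PySem.Dict.get? (PySem.Dict.mk offsets) stn with
  | none => none
  | some off =>
    let occ := PySem.Dict.getD (PySem.Dict.mk occupancy) stn []
    if occ = [] then none
    else
      let arr := PySem.Int.mod (dep_min + off) 1440
      let pos := pvInsPoint occ arr 0 occ.length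
      some (min (arr - pvSlot occ ((pos : Int) - 1)) (pvSlot occ (pos : Int) - arr))

-- the collection loop of Source B ('gaps.append', early 'return None, stn' as Sum.inl)
def pvCollect (dep_min : Int) (offsets : List (String × Int)) (occupancy : List (String × List Int)) (min_headway : Int) : List String → List (Int × String) → String ⊕ List (Int × String)
  | [], gaps => Sum.inr gaps
  | stn :: rest, gaps =>
    match pvStationGap stn dep_min offsets occupancy with
    | none => pvCollect dep_min offsets occupancy min_headway rest gaps
    | some g =>
      if g < min_headway then Sum.inl stn
      else pvCollect dep_min offsets occupancy min_headway rest (gaps ++ [(g, stn)])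

-- min(nonempty, key=…) ported as PySem.List.min? (first extremal); getD is a totality guard
-- never reached on a nonempty list
def check_departure_alt (dep_min : Int) (route : List String) (offsets : List (String × Int)) (occupancy : List (String × List Int)) (min_headway : Int) : Option Int × String :=
  match pvCollect dep_min offsets occupancy min_headway route [] with
  | Sum.inl stn => (none, stn)
  | Sum.inr gaps =>
    let best := (PySem.List.min? ((9999, route.headD "") :: gaps) (fun p => p.1)).getD (9999, route.headD "")
    (some best.1, best.2)

-- ===== PRECONDITION & SPEC =====
-- Pre_ excludes only the empty route, on which A raises IndexError at route[0] (B does too)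
def Pre_check_departure (dep_min : Int) (route : List String) (offsets : List (String × Int)) (occupancy : List (String × List Int)) (min_headway : Int) : Prop :=
  route ≠ []

instance (dep_min : Int) (route : List String) (offsets : List (String × Int)) (occupancy : List (String × List Int)) (min_headway : Int) : Decidable (Pre_check_departure dep_min route offsets occupancy min_headway) := by unfold Pre_check_departure; infer_instance

def pvWitness_check_departure : Int × List String × (List (String × Int)) × (List (String × List Int)) × Int :=
  (500, ["s", "u"], [("s", 10), ("u", 25)], [("s", [100, 515, 900]), ("u", [530])], 4)

def Spec_check_departure (dep_min : Int) (route : List String) (offsets : List (String × Int)) (occupancy : List (String × List Int)) (min_headway : Int) (out : Option Int × String) : Prop := out = check_departure_alt dep_min route offsets occupancy min_headway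
instance (dep_min : Int) (route : List String) (offsets : List (String × Int)) (occupancy : List (String × List Int)) (min_headway : Int) (out : Option Int × String) : Decidable (Spec_check_departure dep_min route offsets occupancy min_headway out) := by unfold Spec_check_departure; infer_instance

-- ===== CLAIM (what is proved, stated in full; the proofs are below) =====
def Claim_equal_check_departure : Prop := ∀ (dep_min : Int) (route : List String) (offsets : List (String × Int)) (occupancy : List (String × List Int)) (min_headway : Int), Dom_check_departure dep_min route offsets occupancy min_headway → Pre_check_departure dep_min route offsets occupancy min_headway → Spec_check_departure dep_min route offsets occupancy min_headway (check_departure dep_min route offsets occupancy min_headway)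

-- ===== LEMMAS AND PROOFS =====

-- bisect_left never exceeds the list length (no sortedness needed)
theorem pv_bisectLoop_le (xs : List Int) (x : Int) :
    ∀ (fuel lo hi : Nat), lo ≤ hi → PySem.List.bisectLeftLoop xs x fuel lo hi ≤ hi := by
  intro fuel
  induction fuel with
  | zero => intro lo hi h; simpa [PySem.List.bisectLeftLoop] using h
  | succ n ih =>
    intro lo hi h
    unfold PySem.List.bisectLeftLoop
    by_cases hlh : lo < hi
    · simp only [hlh, if_pos]
      cases hx : xs[(lo + hi) / 2]? with
      | none => simpa using h
      | some y =>
        simp only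
        by_cases hy : y < x
        · simp only [hy, if_pos]
          exact ih ((lo + hi) / 2 + 1) hi (by omega)
        · simp only [hy, if_neg]
          exact le_trans (ih lo ((lo + hi) / 2) (by omega)) (by omega)
    · simpa [hlh] using h

-- the recursive insertion-point search computes exactly bisect_left's loop
theorem pv_ins_eq (occ : List Int) (x : Int) :
    ∀ (fuel lo hi : Nat), hi ≤ occ.length → hi - lo ≤ fuel →
      pvInsPoint occ x lo hi = PySem.List.bisectLeftLoop occ x fuel lo hi := by
  intro fuel
  induction fuel with
  | zero =>
    intro lo hi _ hf
    unfold pvInsPoint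
    rw [if_neg (by omega)]
    simp [PySem.List.bisectLeftLoop]
  | succ n ih =>
    intro lo hi hlen hf
    unfold pvInsPoint PySem.List.bisectLeftLoop
    by_cases hlh : lo < hi
    · rw [if_pos hlh, if_pos hlh]
      have hm : (lo + hi) / 2 < occ.length := by omega
      rw [List.getElem?_eq_getElem hm]
      simp only
      rw [List.getD_eq_getElem?_getD, List.getElem?_eq_getElem hm]
      simp only [Option.getD_some]
      by_cases hy : occ[(lo + hi) / 2] < x
      · rw [if_pos hy, if_pos hy]
        exact ih ((lo + hi) / 2 + 1) hi hlen (by omega)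
      · rw [if_neg hy, if_neg hy]
        exact ih lo ((lo + hi) / 2) (by omega) (by omega)
    · rw [if_neg hlh, if_neg hlh]

-- Python mod/floordiv facts for the periodic-extension indices
theorem pv_fmod_nonneg (i n : Int) (h0 : 0 ≤ i) (h : i < n) : PySem.Int.mod i n = i := by
  unfold PySem.Int.mod
  rw [Int.fmod_eq_emod, if_pos (Or.inl (by omega : (0:Int) ≤ n)), add_zero]
  exact Int.emod_eq_of_lt h0 h
theorem pv_fdiv_nonneg (i n : Int) (h0 : 0 ≤ i) (h : i < n) : PySem.Int.floordiv i n = 0 := by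
  unfold PySem.Int.floordiv
  rw [Int.fdiv_eq_ediv, if_pos (Or.inl (by omega : (0:Int) ≤ n)), sub_zero]
  exact Int.ediv_eq_zero_of_lt h0 h
theorem pv_fmod_neg_one (n : Int) (h : 0 < n) : PySem.Int.mod (-1) n = n - 1 := by
  unfold PySem.Int.mod
  rw [Int.fmod_eq_emod, if_pos (Or.inl (by omega : (0:Int) ≤ n)), add_zero]
  have h3 : (-1 : Int) = (n - 1) + n * (-1) := by ring
  rw [h3, Int.add_mul_emod_self_left]
  exact Int.emod_eq_of_lt (by omega) (by omega)
theorem pv_fdiv_neg_one (n : Int) (h : 0 < n) : PySem.Int.floordiv (-1) n = -1 := by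
  unfold PySem.Int.floordiv
  rw [Int.fdiv_eq_ediv, if_pos (Or.inl (by omega : (0:Int) ≤ n)), sub_zero]
  have h3 : (-1 : Int) = (n - 1) + n * (-1) := by ring
  rw [h3, Int.add_mul_ediv_left _ _ (by omega : n ≠ 0),
      Int.ediv_eq_zero_of_lt (by omega) (by omega)]
  omega
theorem pv_fmod_self (n : Int) : PySem.Int.mod n n = 0 := by
  unfold PySem.Int.mod; simp
theorem pv_fdiv_self (n : Int) (h : 0 < n) : PySem.Int.floordiv n n = 1 := by
  unfold PySem.Int.floordiv
  rw [Int.fdiv_eq_ediv, if_pos (Or.inl (by omega : (0:Int) ≤ n)), sub_zero]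
  exact Int.ediv_self (by omega)

-- the three periodic-extension slots the programs reach
theorem pv_slot_of_lt (occ : List Int) (k : Nat) (hk : k < occ.length) :
    pvSlot occ (k : Int) = occ.getD k 0 := by
  unfold pvSlot
  rw [pv_fmod_nonneg _ _ (by omega) (by exact_mod_cast hk),
      pv_fdiv_nonneg _ _ (by omega) (by exact_mod_cast hk)]
  simp
theorem pv_slot_neg_one (occ : List Int) (hne : occ ≠ []) :
    pvSlot occ (-1) = PySem.List.pyGetD occ (-1) 0 - 1440 := by
  have hlen : 0 < occ.length := List.length_pos_iff.mpr hne
  unfold pvSlot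
  rw [pv_fmod_neg_one _ (by exact_mod_cast hlen), pv_fdiv_neg_one _ (by exact_mod_cast hlen)]
  have ht : ((occ.length : Int) - 1).toNat = occ.length - 1 := by omega
  rw [ht]
  simp only [PySem.List.pyGetD, PySem.List.pyGet?, PySem.List.pyIdx?]
  rw [if_neg (by norm_num), if_pos (by omega)]
  have h1 : occ.length - (-(-1:Int)).toNat = occ.length - 1 := by norm_num
  rw [h1]
  simp only [Option.bind_some]
  rw [List.getElem?_eq_getElem (by omega), List.getD_eq_getElem?_getD,
      List.getElem?_eq_getElem (by omega : occ.length - 1 < occ.length)]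
  simp only [Option.getD_some]
  ring
theorem pv_slot_len (occ : List Int) (hne : occ ≠ []) :
    pvSlot occ (occ.length : Int) = occ.getD 0 0 + 1440 := by
  have hlen : 0 < occ.length := List.length_pos_iff.mpr hne
  unfold pvSlot
  rw [pv_fmod_self, pv_fdiv_self _ (by exact_mod_cast hlen)]
  simp

-- B's periodic-neighbour gap equals A's bisect-based min neighbour gap (nonempty occ)
theorem pv_gap_eq (occ : List Int) (arr : Int) (hne : occ ≠ []) :
    min (arr - pvSlot occ ((pvInsPoint occ arr 0 occ.length : Int) - 1))
        (pvSlot occ (pvInsPoint occ arr 0 occ.length : Int) - arr)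
    = min (arr - (if 0 < PySem.List.bisectLeft occ arr then occ.getD (PySem.List.bisectLeft occ arr - 1) 0 else PySem.List.pyGetD occ (-1) 0 - 1440))
          ((if PySem.List.bisectLeft occ arr < occ.length then occ.getD (PySem.List.bisectLeft occ arr) 0 else occ.getD 0 0 + 1440) - arr) := by
  have hlen : 0 < occ.length := List.length_pos_iff.mpr hne
  have hins : pvInsPoint occ arr 0 occ.length = PySem.List.bisectLeft occ arr := by
    unfold PySem.List.bisectLeft
    exact pv_ins_eq occ arr occ.length 0 occ.length (le_refl _) (by omega)
  have hle : PySem.List.bisectLeft occ arr ≤ occ.length := by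
    unfold PySem.List.bisectLeft
    exact pv_bisectLoop_le occ arr occ.length 0 occ.length (Nat.zero_le _)
  rw [hins]
  set pos := PySem.List.bisectLeft occ arr with hpos
  have h1 : pvSlot occ ((pos : Int) - 1)
      = (if 0 < pos then occ.getD (pos - 1) 0 else PySem.List.pyGetD occ (-1) 0 - 1440) := by
    by_cases hp : 0 < pos
    · rw [if_pos hp]
      have hc : ((pos : Int) - 1) = ((pos - 1 : Nat) : Int) := by omega
      rw [hc, pv_slot_of_lt occ (pos - 1) (by omega)]
    · rw [if_neg hp]
      have hc : ((pos : Int) - 1) = (-1 : Int) := by omega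
      rw [hc, pv_slot_neg_one occ hne]
  have h2 : pvSlot occ (pos : Int)
      = (if pos < occ.length then occ.getD pos 0 else occ.getD 0 0 + 1440) := by
    by_cases hp : pos < occ.length
    · rw [if_pos hp, pv_slot_of_lt occ pos hp]
    · rw [if_neg hp]
      have hc : pos = occ.length := by omega
      rw [hc]
      exact pv_slot_len occ hne
  rw [h1, h2]

-- the gap accumulator of pvCollect factors out as an append
theorem pv_collect_acc (dep_min : Int) (offsets : List (String × Int)) (occupancy : List (String × List Int)) (min_headway : Int) :
    ∀ (route : List String) (gaps : List (Int × String)),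
      pvCollect dep_min offsets occupancy min_headway route gaps
      = match pvCollect dep_min offsets occupancy min_headway route [] with
        | Sum.inl s => Sum.inl s
        | Sum.inr gs => Sum.inr (gaps ++ gs) := by
  intro route
  induction route with
  | nil => intro gaps; simp [pvCollect]
  | cons stn rest ih =>
    intro gaps
    simp only [pvCollect, List.nil_append]
    cases pvStationGap stn dep_min offsets occupancy with
    | none => exact ih gaps
    | some g =>
      by_cases hg : g < min_headway
      · simp [hg]
      · simp only [hg, ite_false]
        rw [ih (gaps ++ [(g, stn)]), ih [(g, stn)]]
        cases pvCollect dep_min offsets occupancy min_headway rest [] with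
        | inl s => rfl
        | inr gs => simp

-- Python min(…, key=…) keeps the FIRST extremal element: folding in one more candidate
theorem pv_min?_cons_cons (g w : Int) (s b : String) (t : List (Int × String)) :
    PySem.List.min? ((w, b) :: (g, s) :: t) (fun p => p.1)
    = PySem.List.min? ((if g < w then (g, s) else (w, b)) :: t) (fun p => p.1) := by
  simp only [PySem.List.min?, List.foldl]
  split_ifs <;> rfl

-- a nonempty candidate list always has a first minimum
theorem pv_min?_cons_ne_none (x : Int × String) (t : List (Int × String)) :
    PySem.List.min? (x :: t) (fun p => p.1) ≠ none := by
  simp [PySem.List.min?_eq_none_iff]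

-- the shared per-station tail: feasibility test then accumulator-vs-candidate step
theorem pv_tail (dep_min : Int) (offsets : List (String × Int)) (occupancy : List (String × List Int)) (min_headway : Int) (rest : List String)
    (ih : ∀ (w : Int) (b : String),
      pvALoop dep_min offsets occupancy min_headway rest w b
      = match pvCollect dep_min offsets occupancy min_headway rest [] with
        | Sum.inl stn => (none, stn)
        | Sum.inr gaps =>
          let best := (PySem.List.min? ((w, b) :: gaps) (fun p => p.1)).getD (w, b)
          (some best.1, best.2))
    (g w : Int) (stn b : String) :
    (if g < min_headway then ((none : Option Int), stn)
     else if g < w then pvALoop dep_min offsets occupancy min_headway rest g stn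
     else pvALoop dep_min offsets occupancy min_headway rest w b)
    = match (if g < min_headway then Sum.inl stn else pvCollect dep_min offsets occupancy min_headway rest [(g, stn)]) with
      | Sum.inl s => (none, s)
      | Sum.inr gaps =>
        let best := (PySem.List.min? ((w, b) :: gaps) (fun p => p.1)).getD (w, b)
        (some best.1, best.2) := by
  by_cases hfail : g < min_headway
  · simp [hfail]
  · rw [if_neg hfail, if_neg hfail,
        pv_collect_acc dep_min offsets occupancy min_headway rest [(g, stn)]]
    cases hc : pvCollect dep_min offsets occupancy min_headway rest [] with
    | inl s =>
      rw [ih g stn, ih w b, hc]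
      split_ifs <;> rfl
    | inr gs =>
      rw [ih g stn, ih w b, hc]
      simp only [List.singleton_append]
      rw [pv_min?_cons_cons g w stn b gs]
      by_cases hupd : g < w
      · rw [if_pos hupd, if_pos hupd]
        cases hm : PySem.List.min? ((g, stn) :: gs) (fun p => p.1) with
        | none => exact absurd hm (pv_min?_cons_ne_none _ _)
        | some m => rfl
      · rw [if_neg hupd, if_neg hupd]

-- the two programs agree: loop against collect-then-min, by induction over the route
theorem pv_loop_eq (dep_min : Int) (offsets : List (String × Int)) (occupancy : List (String × List Int)) (min_headway : Int) :
    ∀ (route : List String) (w : Int) (b : String),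
      pvALoop dep_min offsets occupancy min_headway route w b
      = match pvCollect dep_min offsets occupancy min_headway route [] with
        | Sum.inl stn => (none, stn)
        | Sum.inr gaps =>
          let best := (PySem.List.min? ((w, b) :: gaps) (fun p => p.1)).getD (w, b)
          (some best.1, best.2) := by
  intro route
  induction route with
  | nil =>
    intro w b
    simp [pvALoop, pvCollect, PySem.List.min?]
  | cons stn rest ih =>
    intro w b
    simp only [pvALoop, pvCollect, pvStationGap, List.nil_append]
    cases hoff : PySem.Dict.get? (PySem.Dict.mk offsets) stn with
    | none => exact ih w b
    | some off =>
      by_cases hnil : PySem.Dict.getD (PySem.Dict.mk occupancy) stn [] = []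
      · simp only [hnil, ite_true]
        exact ih w b
      · simp only [if_neg hnil]
        rw [pv_gap_eq (PySem.Dict.getD (PySem.Dict.mk occupancy) stn []) (PySem.Int.mod (dep_min + off) 1440) hnil]
        simp only [← min_lt_iff]
        exact pv_tail dep_min offsets occupancy min_headway rest ih _ w stn b

-- ===== VERDICT (by name: the statement is the Claim_ definition above) =====
theorem check_departure_spec : Claim_equal_check_departure := by
  intro dep_min route offsets occupancy min_headway _hDom _hPre
  unfold Spec_check_departure check_departure check_departure_alt
  exact pv_loop_eq dep_min offsets occupancy min_headway route 9999 (route.headD "")
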